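-- pv_equiv track=rewrite | github.com/zstephens/telogator | source/tg_cluster.py | get_adj_from_gaps
-- ===== SOURCE A (Python) =====
-- MAX_GAP_BLOCK = 3
--
-- def get_adj_from_gaps(s):
-- 	in_gap     = False
-- 	gap_count  = 0
-- 	gap_blocks = []
-- 	for i in range(len(s)):
-- 		if s[i] == '-':
-- 			if in_gap == False:
-- 				gap_start = i
-- 			in_gap = True
-- 		else:
-- 			if in_gap:
-- 				gap_blocks.append((gap_start,i))
-- 				gap_count += 1
-- 			in_gap = False
-- 		if gap_count >= MAX_GAP_BLOCK:
-- 			break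
-- 	out_adj = 0
-- 	if len(gap_blocks):
-- 		gap_so_far  = [gap_blocks[0][1]-gap_blocks[0][0]]
-- 		cost_so_far = [gap_blocks[0][0]]
-- 		for i in range(1,len(gap_blocks)):
-- 			gap_so_far.append(gap_so_far[-1] + gap_blocks[i][1]-gap_blocks[i][0])
-- 			cost_so_far.append(cost_so_far[-1] + gap_blocks[i][0]-gap_blocks[i-1][1])
-- 		best_gap = sorted([(gap_so_far[i]-cost_so_far[i],i) for i in range(len(gap_blocks))], reverse=True)[0]
-- 		if best_gap[0] > 0:
-- 			out_adj = gap_blocks[best_gap[1]][1]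
-- 	return out_adj
-- ===== SOURCE B (Python) =====
-- MAX_GAP_BLOCK = 3
--
-- def get_adj_from_gaps(s):
-- 	# one pass: stream gap blocks, tracking running gap/cost and the best (value, end);
-- 	# '>=' makes a later equal-valued block win, matching A's reverse-sort tie-break.
-- 	in_gap = False
-- 	gap_start = 0
-- 	prev_end = 0
-- 	blocks = 0
-- 	gap_total = 0
-- 	cost = 0
-- 	best_value = None
-- 	best_end = 0
-- 	for i, ch in enumerate(s):
-- 		if ch == '-':
-- 			if not in_gap:
-- 				gap_start = i
-- 				in_gap = True
-- 		elif in_gap: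
-- 			in_gap = False
-- 			cost += gap_start - (prev_end if blocks else 0)
-- 			gap_total += i - gap_start
-- 			prev_end = i
-- 			blocks += 1
-- 			value = gap_total - cost
-- 			if best_value is None or value >= best_value:
-- 				best_value = value
-- 				best_end = i
-- 			if blocks >= MAX_GAP_BLOCK:
-- 				break
-- 	return best_end if best_value is not None and best_value > 0 else 0
-- ===== Notes on version B (the rewrite author's own statement) =====
-- stated objective: simpler
-- what changed: A collects the gap blocks into a list, builds gap_so_far/cost_so_far prefix arrays, decorates with indices and reverse-sorts to pick the best block; B is a single streaming pass that keeps a running gap total, cost and best (value, end) pair (updated with >= so later ties win, matching the sort's tie-break) and never materializes any list.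
import Mathlib
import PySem

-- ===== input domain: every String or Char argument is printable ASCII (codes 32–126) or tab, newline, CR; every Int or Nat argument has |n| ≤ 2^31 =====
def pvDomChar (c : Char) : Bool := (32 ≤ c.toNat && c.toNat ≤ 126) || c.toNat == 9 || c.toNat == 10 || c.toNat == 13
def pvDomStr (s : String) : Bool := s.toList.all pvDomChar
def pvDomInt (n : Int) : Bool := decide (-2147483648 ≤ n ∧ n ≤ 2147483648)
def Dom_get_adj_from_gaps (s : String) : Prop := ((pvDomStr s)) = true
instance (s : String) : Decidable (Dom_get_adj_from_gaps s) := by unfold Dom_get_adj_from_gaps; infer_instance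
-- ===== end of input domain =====

-- B replaces A's collect-blocks + prefix-arrays + reverse-sort pipeline by a single streaming
-- pass that keeps a running best (value, end); objective: simpler, same O(n) cost.

-- ===== PORT A =====
-- first loop of A: collect up to MAX_GAP_BLOCK = 3 gap blocks (break when gap_count >= 3)
def aScan : List Char → Int → Bool → Int → Int → List (Int × Int) → List (Int × Int)
  | [], _, _, _, _, blocks => blocks
  | c :: rest, i, in_gap, gap_start, gap_count, blocks =>
    if c = '-' then
      let gap_start' := if in_gap = false then i else gap_start
      if gap_count ≥ 3 then blocks
      else aScan rest (i + 1) true gap_start' gap_count blocks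
    else
      let blocks' := if in_gap then blocks ++ [(gap_start, i)] else blocks
      let gap_count' := if in_gap then gap_count + 1 else gap_count
      if gap_count' ≥ 3 then blocks'
      else aScan rest (i + 1) false gap_start gap_count' blocks'

-- second loop of A: build gap_so_far / cost_so_far (running last values kept alongside the lists)
def aLists : List (Int × Int) → (Int × Int) → Int → Int → List Int → List Int → List Int × List Int
  | [], _, _, _, gs, cs => (gs, cs)
  | b :: rest, prev, g, c, gs, cs =>
    let g' := g + b.2 - b.1
    let c' := c + b.1 - prev.2
    aLists rest b g' c' (gs ++ [g']) (cs ++ [c'])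

def aPhase2 (blocks : List (Int × Int)) : Int :=
  match blocks with
  | [] => 0
  | b0 :: rest =>
    let gc := aLists rest b0 (b0.2 - b0.1) b0.1 [b0.2 - b0.1] [b0.1]
    let decorated := (PySem.List.pyRange 0 (blocks.length : Int) 1).map
      (fun i => (PySem.List.pyGetD gc.1 i 0 - PySem.List.pyGetD gc.2 i 0, i))
    let best := (PySem.List.sorted2 decorated (fun x => x.1) (fun x => x.2) true).headD (0, 0)
    if best.1 > 0 then (PySem.List.pyGetD blocks best.2 (0, 0)).2 else 0

def get_adj_from_gaps (s : String) : Int :=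
  aPhase2 (aScan s.toList 0 false 0 0 [])

-- ===== PORT B =====
def bFinish (best : Option Int) (best_end : Int) : Int :=
  match best with
  | some v => if v > 0 then best_end else 0
  | none => 0

def bLoop : List Char → Int → Bool → Int → Int → Int → Int → Int → Option Int → Int → Int
  | [], _, _, _, _, _, _, _, best, best_end => bFinish best best_end
  | c :: rest, i, in_gap, gap_start, prev_end, blocks, gap_total, cost, best, best_end =>
    if c = '-' then
      if in_gap then bLoop rest (i + 1) in_gap gap_start prev_end blocks gap_total cost best best_end
      else bLoop rest (i + 1) true i prev_end blocks gap_total cost best best_end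
    else if in_gap then
      let cost' := cost + gap_start - (if blocks ≠ 0 then prev_end else 0)
      let gap_total' := gap_total + i - gap_start
      let blocks' := blocks + 1
      let value := gap_total' - cost'
      let upd := match best with | none => true | some bv => value ≥ bv
      let best' := if upd then some value else best
      let best_end' := if upd then i else best_end
      if blocks' ≥ 3 then bFinish best' best_end'
      else bLoop rest (i + 1) false gap_start i blocks' gap_total' cost' best' best_end'
    else bLoop rest (i + 1) false gap_start prev_end blocks gap_total cost best best_end

def get_adj_from_gaps_alt (s : String) : Int :=
  bLoop s.toList 0 false 0 0 0 0 0 none 0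

-- ===== PRECONDITION & SPEC =====
def Spec_get_adj_from_gaps (s : String) (out : Int) : Prop := out = get_adj_from_gaps_alt s
instance (s : String) (out : Int) : Decidable (Spec_get_adj_from_gaps s out) := by unfold Spec_get_adj_from_gaps; infer_instance

-- ===== CLAIM (what is proved, stated in full; the proofs are below) =====
def Claim_equal_get_adj_from_gaps : Prop := ∀ (s : String), Dom_get_adj_from_gaps s → Spec_get_adj_from_gaps s (get_adj_from_gaps s)

-- ===== LEMMAS AND PROOFS =====

-- abstraction of B's streaming state as a function of the block list A would have collected
structure BSt where
  n : Int
  pe : Int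
  gt : Int
  co : Int
  best : Option Int
  be : Int

def stepF (st : BSt) (b : Int × Int) : BSt :=
  let co' := st.co + b.1 - (if st.n ≠ 0 then st.pe else 0)
  let gt' := st.gt + b.2 - b.1
  let v := gt' - co'
  let upd := match st.best with | none => true | some bv => v ≥ bv
  ⟨st.n + 1, b.2, gt', co', if upd then some v else st.best, if upd then b.2 else st.be⟩

def F (bs : List (Int × Int)) : BSt :=
  bs.foldl stepF ⟨0, 0, 0, 0, none, 0⟩

lemma F_n_aux (bs : List (Int × Int)) (init : BSt) :
    (bs.foldl stepF init).n = init.n + bs.length := by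
  induction bs generalizing init with
  | nil => simp
  | cons b t ih => simp [List.foldl, ih, stepF]; ring

lemma F_n (bs : List (Int × Int)) : (F bs).n = bs.length := by
  simp [F, F_n_aux]

lemma L1 (cs : List Char) (i : Int) (ig : Bool) (gs : Int) (bs : List (Int × Int))
    (h : bs.length < 3) :
    bLoop cs i ig gs (F bs).pe (F bs).n (F bs).gt (F bs).co (F bs).best (F bs).be
      = bFinish (F (aScan cs i ig gs (bs.length : Int) bs)).best (F (aScan cs i ig gs (bs.length : Int) bs)).be := by
  induction cs generalizing i ig gs bs with
  | nil => simp [bLoop, aScan]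
  | cons c rest ih =>
    by_cases hc : c = '-'
    · have hcnt : ¬ ((bs.length : Int) ≥ 3) := by omega
      cases ig with
      | false => simp [bLoop, aScan, hc, hcnt]; exact ih (i + 1) true i bs h
      | true => simp [bLoop, aScan, hc, hcnt]; exact ih (i + 1) true gs bs h
    · cases ig with
      | false =>
        have hcnt : ¬ ((bs.length : Int) ≥ 3) := by omega
        simp [bLoop, aScan, hc, hcnt]
        exact ih (i + 1) false gs bs h
      | true =>
        have hFapp : F (bs ++ [(gs, i)]) = stepF (F bs) (gs, i) := by
          simp [F, List.foldl_append]
        by_cases h3 : bs.length + 1 = 3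
        · have hcnt : ((bs.length : Int) + 1 ≥ 3) := by omega
          simp [bLoop, aScan, hc, hcnt, F_n, hFapp, stepF]
        · have hcnt : ¬ ((bs.length : Int) + 1 ≥ 3) := by omega
          have hlen : (bs ++ [(gs, i)]).length < 3 := by simp; omega
          have := ih (i + 1) false gs (bs ++ [(gs, i)]) hlen
          simp [bLoop, aScan, hc, hcnt, F_n, hFapp, stepF] at this ⊢
          convert this using 3

lemma L3 (cs : List Char) (i : Int) (ig : Bool) (gs : Int) (bs : List (Int × Int))
    (h : bs.length < 3) :
    (aScan cs i ig gs (bs.length : Int) bs).length ≤ 3 := by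
  induction cs generalizing i ig gs bs with
  | nil => simp [aScan]; omega
  | cons c rest ih =>
    by_cases hc : c = '-'
    · have hcnt : ¬ ((bs.length : Int) ≥ 3) := by omega
      simp [aScan, hc, hcnt]
      cases ig <;> simp <;> exact ih (i + 1) true _ bs h
    · cases ig with
      | false =>
        have hcnt : ¬ ((bs.length : Int) ≥ 3) := by omega
        simp [aScan, hc, hcnt]
        exact ih (i + 1) false gs bs h
      | true =>
        by_cases h3 : bs.length + 1 = 3
        · have hcnt : ((bs.length : Int) + 1 ≥ 3) := by omega
          simp [aScan, hc, hcnt]; omega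
        · have hcnt : ¬ ((bs.length : Int) + 1 ≥ 3) := by omega
          have hlen : (bs ++ [(gs, i)]).length < 3 := by simp; omega
          have := ih (i + 1) false gs (bs ++ [(gs, i)]) hlen
          simp [aScan, hc, hcnt]
          simpa using this

lemma insertBy_nil {α : Type} (cmp : α → α → Bool) (x : α) : PySem.List.insertBy cmp x [] = [x] := rfl

lemma head_insertBy_two {α : Type} (cmp : α → α → Bool) (x p q d : α) :
    ((PySem.List.insertBy cmp x (PySem.List.insertBy cmp p [q])).head?.getD d)
      = (if cmp x (if cmp p q then p else q) then x else (if cmp p q then p else q)) := by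
  by_cases h : cmp p q <;> simp [PySem.List.insertBy, h] <;> split_ifs <;> simp_all

set_option maxHeartbeats 4000000 in
lemma L2 (bs : List (Int × Int)) (h : bs.length ≤ 3) :
    aPhase2 bs = bFinish (F bs).best (F bs).be := by
  match bs with
  | [] => rfl
  | [a] =>
    simp [aPhase2, aLists, F, stepF, bFinish, (show PySem.List.pyRange 0 1 1 = [0] from rfl),
      PySem.List.pyGetD, PySem.List.sorted2, PySem.List.insertBy, PySem.List.pyGet?,
      PySem.List.pyIdx?]
  | [a, b] =>
    simp [aPhase2, aLists, F, stepF, bFinish, (show PySem.List.pyRange 0 2 1 = [0, 1] from rfl),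
      PySem.List.pyGetD, PySem.List.sorted2, PySem.List.insertBy, PySem.List.pyGet?,
      PySem.List.pyIdx?] <;> split_ifs <;> simp_all <;> omega
  | [a, b, c] =>
    simp [aPhase2, aLists, F, stepF, bFinish, (show PySem.List.pyRange 0 3 1 = [0, 1, 2] from rfl),
      PySem.List.pyGetD, PySem.List.sorted2, PySem.List.pyGet?, PySem.List.pyIdx?,
      insertBy_nil, head_insertBy_two] <;> split_ifs <;> simp_all <;> omega
  | _ :: _ :: _ :: _ :: _ => (simp only [List.length_cons] at h; omega)

-- ===== VERDICT (by name: the statement is the Claim_ definition above) =====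
theorem get_adj_from_gaps_spec : Claim_equal_get_adj_from_gaps := by
  intro s _
  unfold Spec_get_adj_from_gaps get_adj_from_gaps get_adj_from_gaps_alt
  have h1 := L1 s.toList 0 false 0 [] (by simp)
  have h2 := L2 (aScan s.toList 0 false 0 0 []) (by simpa using L3 s.toList 0 false 0 [] (by simp))
  simp [F] at h1
  rw [h2]
  simpa [bFinish] using h1.symm
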